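-- pv_equiv track=rewrite | github.com/joxoleon/advent-of-code-2025 | days/day09/pt2_gippidy.py | build_red_maps
-- ===== SOURCE A (Python) =====
-- from collections import defaultdict
--
-- def build_red_maps(pts):
--     reds_by_row = defaultdict(list)
--     reds_by_col = defaultdict(list)
--     for x, y in pts:
--         reds_by_row[y].append(x)
--         reds_by_col[x].append(y)
--     for y in reds_by_row:
--         reds_by_row[y].sort()
--     for x in reds_by_col:
--         reds_by_col[x].sort()
--     return reds_by_row, reds_by_col
-- ===== SOURCE B (Python) =====
-- from collections import defaultdict
--
--
-- def _insort(lst, v):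
--     i = 0
--     while i < len(lst) and lst[i] <= v:
--         i += 1
--     lst.insert(i, v)
--
--
-- def build_red_maps(pts):
--     reds_by_row = defaultdict(list)
--     reds_by_col = defaultdict(list)
--     for x, y in pts:
--         _insort(reds_by_row[y], x)
--         _insort(reds_by_col[x], y)
--     return reds_by_row, reds_by_col
-- ===== Notes on version B (the rewrite author's own statement) =====
-- stated objective: alternative
-- what changed: Single pass that keeps every row/column bucket sorted by on-line insertion (insertion into the sorted bucket as each point arrives) instead of appending unsorted and running a separate sort pass over each bucket afterwards.
import Mathlib
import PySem

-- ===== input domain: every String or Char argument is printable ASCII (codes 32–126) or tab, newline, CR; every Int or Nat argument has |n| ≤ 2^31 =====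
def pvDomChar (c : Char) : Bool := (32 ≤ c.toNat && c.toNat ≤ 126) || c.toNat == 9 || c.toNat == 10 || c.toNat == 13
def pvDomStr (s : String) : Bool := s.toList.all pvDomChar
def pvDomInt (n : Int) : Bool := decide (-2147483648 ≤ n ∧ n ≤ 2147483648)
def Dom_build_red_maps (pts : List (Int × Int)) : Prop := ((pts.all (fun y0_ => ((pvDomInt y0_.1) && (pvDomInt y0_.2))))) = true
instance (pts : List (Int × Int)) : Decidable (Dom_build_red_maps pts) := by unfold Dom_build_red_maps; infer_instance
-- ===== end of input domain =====

-- B replaces A's append-then-sort-each-bucket with a single pass that keeps each bucket sorted by on-line insertion; alternative decomposition, same results.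

-- ===== PORT A =====
def build_red_maps (pts : List (Int × Int)) : (List (Int × List Int)) × (List (Int × List Int)) :=
  let maps := pts.foldl (fun d p =>
      (d.1.modify p.2 [] (fun l => l ++ [p.1]), d.2.modify p.1 [] (fun l => l ++ [p.2])))
    (PySem.Dict.empty, PySem.Dict.empty)
  let row := maps.1.keys.foldl (fun d y => d.modify y [] (fun l => PySem.List.sorted l (fun v => v))) maps.1
  let col := maps.2.keys.foldl (fun d x => d.modify x [] (fun l => PySem.List.sorted l (fun v => v))) maps.2
  (row.items, col.items)

-- ===== PORT B =====
-- _insort from Source B: insert v after the elements ≤ v (left scan)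
def pvInsort (lst : List Int) (v : Int) : List Int :=
  match lst with
  | [] => [v]
  | h :: t => if h ≤ v then h :: pvInsort t v else v :: h :: t

def build_red_maps_alt (pts : List (Int × Int)) : (List (Int × List Int)) × (List (Int × List Int)) :=
  let maps := pts.foldl (fun d p =>
      (d.1.modify p.2 [] (fun l => pvInsort l p.1), d.2.modify p.1 [] (fun l => pvInsort l p.2)))
    (PySem.Dict.empty, PySem.Dict.empty)
  (maps.1.items, maps.2.items)

-- ===== PRECONDITION & SPEC =====
def Spec_build_red_maps (pts : List (Int × Int)) (out : (List (Int × List Int)) × (List (Int × List Int))) : Prop := out = build_red_maps_alt pts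
instance (pts : List (Int × Int)) (out : (List (Int × List Int)) × (List (Int × List Int))) : Decidable (Spec_build_red_maps pts out) := by unfold Spec_build_red_maps; infer_instance

-- ===== CLAIM (what is proved, stated in full; the proofs are below) =====
def Claim_equal_build_red_maps : Prop := ∀ (pts : List (Int × Int)), Dom_build_red_maps pts → Spec_build_red_maps pts (build_red_maps pts)

-- ===== LEMMAS AND PROOFS =====

theorem pvInsort_eq_insertBy (l : List Int) (v : Int) :
    pvInsort l v = PySem.List.insertBy (fun a b => decide (a < b)) v l := by
  induction l with
  | nil => rfl
  | cons h t ih =>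
      simp only [pvInsort, PySem.List.insertBy]
      by_cases hv : h ≤ v
      · simp [hv, ih, not_lt.mpr hv]
      · simp [hv, lt_of_not_ge hv]

theorem foldl_pvInsort_eq_sorted (xs : List Int) :
    xs.foldl pvInsort [] = PySem.List.sorted xs (fun v => v) := by
  rw [PySem.List.sorted_eq_foldl_insertBy]
  have h : pvInsort = fun acc x => PySem.List.insertBy (fun a b => decide (a < b)) x acc := by
    funext acc x; exact pvInsort_eq_insertBy acc x
  rw [h]

-- value at key c after a grouping fold with arbitrary bucket update g
theorem getD_foldl_modify_gen {α : Type} (l : List α) (k v : α → Int)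
    (g : List Int → Int → List Int) (d : PySem.Dict Int (List Int)) (c : Int) :
    (l.foldl (fun d p => d.modify (k p) [] (fun w => g w (v p))) d).getD c [] =
      ((l.filter (fun p => k p == c)).map v).foldl g (d.getD c []) := by
  induction l generalizing d with
  | nil => rfl
  | cons p t ih =>
      simp only [List.foldl_cons, List.filter_cons]
      by_cases hc : k p == c
      · have hc' : c = k p := (beq_iff_eq.mp hc).symm
        subst hc'
        rw [ih, PySem.Dict.getD_modify, if_pos rfl, if_pos hc]
        rfl
      · have hc' : ¬ (c = k p) := by
          intro h; exact hc (beq_iff_eq.mpr h.symm)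
        rw [ih, PySem.Dict.getD_modify, if_neg hc', if_neg hc]

-- value at key c after the per-key sort loop
theorem getD_foldl_sortkeys (ks : List Int) (f : List Int → List Int)
    (d : PySem.Dict Int (List Int)) (c : Int) (hnd : ks.Nodup) :
    (ks.foldl (fun d y => d.modify y [] f) d).getD c [] =
      if c ∈ ks then f (d.getD c []) else d.getD c [] := by
  induction ks generalizing d with
  | nil => simp
  | cons y t ih =>
      have hnd' : t.Nodup := hnd.of_cons
      simp only [List.foldl_cons, ih _ hnd', List.mem_cons]
      by_cases hc : c = y
      · subst hc
        have hct : c ∉ t := (List.nodup_cons.mp hnd).1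
        simp [hct]
      · simp [hc, PySem.Dict.getD_modify]

theorem set_update_self (s : PySem.Set Int) (xs : List Int) (h : ∀ x ∈ xs, x ∈ s) :
    PySem.Set.update s xs = s := by
  rw [PySem.Set.update_eq_append_filter]
  have h2 : (PySem.Set.ofList xs).filter (fun y => !(PySem.Set.contains s y)) = [] := by
    rw [List.filter_eq_nil_iff]
    intro a ha
    have h3 : a ∈ s := h a ((PySem.Set.mem_ofList _ _).mp ha)
    simp [h3]
  rw [h2, List.append_nil]

-- one side of the pair: grouping fold + sort loop (A) equals grouping fold by insertion (B)
theorem side_eq (pts : List (Int × Int)) (k v : (Int × Int) → Int) :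
    ((pts.foldl (fun d p => d.modify (k p) [] (fun l => l ++ [v p])) PySem.Dict.empty).keys.foldl
        (fun d y => d.modify y [] (fun l => PySem.List.sorted l (fun v => v)))
        (pts.foldl (fun d p => d.modify (k p) [] (fun l => l ++ [v p])) PySem.Dict.empty)).items =
    (pts.foldl (fun d p => d.modify (k p) [] (fun l => pvInsort l (v p))) PySem.Dict.empty).items := by
  set m := pts.foldl (fun d p => d.modify (k p) [] (fun l => l ++ [v p])) PySem.Dict.empty with hm
  set mB := pts.foldl (fun d p => d.modify (k p) [] (fun l => pvInsort l (v p))) PySem.Dict.empty with hmB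
  set mA := m.keys.foldl (fun d y => d.modify y [] (fun l => PySem.List.sorted l (fun v => v))) m with hmA
  have hkm : m.keys = PySem.Set.update PySem.Dict.empty.keys (pts.map k) :=
    PySem.Dict.keys_foldl_modify_key pts k [] (fun _ p l => l ++ [v p]) PySem.Dict.empty
  have hkB : mB.keys = m.keys := by
    rw [hkm]; exact (PySem.Dict.keys_foldl_modify_key pts k [] (fun _ p l => pvInsort l (v p)) PySem.Dict.empty)
  have hndm : m.keys.Nodup :=
    PySem.Dict.nodup_keys_foldl_modify_key pts k [] _ _ (by simp)
  have hkA : mA.keys = m.keys := by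
    rw [hmA]
    have := PySem.Dict.keys_foldl_modify_key m.keys (fun y => y) []
      (fun _ _ l => PySem.List.sorted l (fun v => v)) m
    simp only [List.map_id'] at this
    rw [this]
    exact set_update_self _ _ (fun x hx => hx)
  have hndA : mA.keys.Nodup := hkA ▸ hndm
  have hndB : mB.keys.Nodup := hkB ▸ hndm
  rw [PySem.Dict.items_eq_map_keys mA hndA [], PySem.Dict.items_eq_map_keys mB hndB [], hkA, hkB]
  apply List.map_congr_left
  intro c hc
  have hA : mA.getD c [] = PySem.List.sorted (m.getD c []) (fun v => v) := by
    rw [hmA, getD_foldl_sortkeys _ _ _ _ hndm, if_pos hc]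
  have hm : m.getD c [] = ((pts.filter (fun p => k p == c)).map v).foldl (fun l x => l ++ [x]) [] := by
    have := getD_foldl_modify_gen pts k v (fun l x => l ++ [x]) PySem.Dict.empty c
    simpa using this
  have hB : mB.getD c [] = ((pts.filter (fun p => k p == c)).map v).foldl pvInsort [] := by
    have := getD_foldl_modify_gen pts k v pvInsort PySem.Dict.empty c
    simpa using this
  have : mA.getD c [] = mB.getD c [] := by
    rw [hA, hm, hB, foldl_pvInsort_eq_sorted]
    congr 1
    simpa using PySem.List.foldl_append_singleton_eq_self (l := (pts.filter (fun p => k p == c)).map v) (acc := [])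
  simp [this]

-- ===== VERDICT (by name: the statement is the Claim_ definition above) =====
theorem build_red_maps_spec : Claim_equal_build_red_maps := by
  intro pts _
  show build_red_maps pts = build_red_maps_alt pts
  simp only [build_red_maps, build_red_maps_alt]
  rw [PySem.List.foldl_prod_mk (f := fun d (p : Int × Int) => PySem.Dict.modify d p.2 [] (fun l => l ++ [p.1]))
        (g := fun d (p : Int × Int) => PySem.Dict.modify d p.1 [] (fun l => l ++ [p.2])),
      PySem.List.foldl_prod_mk (f := fun d (p : Int × Int) => PySem.Dict.modify d p.2 [] (fun l => pvInsort l p.1))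
        (g := fun d (p : Int × Int) => PySem.Dict.modify d p.1 [] (fun l => pvInsort l p.2))]
  rw [Prod.mk.injEq]
  exact ⟨side_eq pts (fun p => p.2) (fun p => p.1), side_eq pts (fun p => p.1) (fun p => p.2)⟩
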